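-- pv_equiv track=rewrite | github.com/ridwanultanvir/Bangla_Grammatical_Error_Detection | external_datasets/gec_rafeed/Codes/Tagging Model/tag_errors.py | encode_tag
-- ===== SOURCE A (Python) =====
-- classes = ['ADJ',
--            'ADJ:FORM',
--            'ADV',
--            'CONJ',
--            'CONTR',
--            'DET',
--            'MORPH',
--            'NOUN',
--            'NOUN:INFL',
--            'NOUN:NUM',
--            'NOUN:POSS',
--            'ORTH',
--            'OTHER',
--            'PART',
--            'PREP',
--            'PRON',
--            'PUNCT',
--            'SPELL',
--            'VERB',
--            'VERB:FORM',
--            'VERB:INFL',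
--            'VERB:SVA',
--            'VERB:TENSE',
--            'WO']
--
-- prefixes = ['M:', 'R:', 'U:']
--
-- def encode_tag(error_tags):
--     label = []
--
--     for c in classes:
--         match = 0
--         for tag in error_tags:
--             if tag[:2] in prefixes:
--                 tag = tag[2:]
--             if tag == c:
--                 match = 1
--         label.append(match)
--
--     return label
-- ===== SOURCE B (Python) =====
-- classes = ['ADJ',
--            'ADJ:FORM',
--            'ADV',
--            'CONJ',
--            'CONTR',
--            'DET',
--            'MORPH',
--            'NOUN',
--            'NOUN:INFL',
--            'NOUN:NUM',
--            'NOUN:POSS',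
--            'ORTH',
--            'OTHER',
--            'PART',
--            'PREP',
--            'PRON',
--            'PUNCT',
--            'SPELL',
--            'VERB',
--            'VERB:FORM',
--            'VERB:INFL',
--            'VERB:SVA',
--            'VERB:TENSE',
--            'WO']
--
-- prefixes = ['M:', 'R:', 'U:']
--
-- def encode_tag(error_tags):
--     # Precompute class -> position once; then a single pass over the tags
--     # writes 1s into a preallocated result, instead of rescanning (and
--     # re-stripping) all tags once per class.
--     index = {c: i for i, c in enumerate(classes)}
--     label = [0] * len(classes)
--     for tag in error_tags:
--         if tag[:2] in prefixes:
--             tag = tag[2:]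
--         i = index.get(tag)
--         if i is not None:
--             label[i] = 1
--     return label
-- ===== Notes on version B (the rewrite author's own statement) =====
-- stated objective: faster
-- what changed: Replaces the nested loop (for each class, rescan and re-strip all tags) by a precomputed class->position dict and one pass over the tags that writes 1s into a preallocated result list.
import Mathlib
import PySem

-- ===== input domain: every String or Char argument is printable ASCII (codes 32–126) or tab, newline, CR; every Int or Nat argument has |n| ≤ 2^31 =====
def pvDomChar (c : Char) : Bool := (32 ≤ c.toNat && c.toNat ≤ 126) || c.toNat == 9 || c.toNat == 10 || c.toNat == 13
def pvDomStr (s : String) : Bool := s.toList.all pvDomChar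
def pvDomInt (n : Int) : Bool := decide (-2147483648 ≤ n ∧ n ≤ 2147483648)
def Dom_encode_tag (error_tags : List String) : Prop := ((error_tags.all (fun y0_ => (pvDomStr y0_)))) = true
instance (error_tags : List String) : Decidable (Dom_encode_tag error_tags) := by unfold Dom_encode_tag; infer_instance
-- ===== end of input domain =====

-- B precomputes a class->position dict and makes ONE pass over the tags, writing 1s into a
-- preallocated result, instead of A's per-class rescan (objective: faster, O(n+|classes|) vs O(n*|classes|)).

def pvClasses : List String :=
  ["ADJ", "ADJ:FORM", "ADV", "CONJ", "CONTR", "DET", "MORPH", "NOUN", "NOUN:INFL",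
   "NOUN:NUM", "NOUN:POSS", "ORTH", "OTHER", "PART", "PREP", "PRON", "PUNCT", "SPELL",
   "VERB", "VERB:FORM", "VERB:INFL", "VERB:SVA", "VERB:TENSE", "WO"]

def pvPrefixes : List String := ["M:", "R:", "U:"]

-- ===== PORT A =====
def encode_tag (error_tags : List String) : List Int :=
  pvClasses.foldl (fun label c =>
    let m : Int := error_tags.foldl (fun m tag =>
      let tag := if pvPrefixes.contains (PySem.Str.slice tag none (some 2)) then
                   PySem.Str.slice tag (some 2) none else tag
      if tag == c then 1 else m) 0
    label ++ [m]) []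

-- ===== PORT B =====
def encode_tag_alt (error_tags : List String) : List Int :=
  let index : PySem.Dict String Int :=
    (PySem.List.enumerate pvClasses 0).foldl (fun d p => d.insert p.2 p.1) PySem.Dict.empty
  error_tags.foldl (fun label tag =>
    let tag := if pvPrefixes.contains (PySem.Str.slice tag none (some 2)) then
                 PySem.Str.slice tag (some 2) none else tag
    match index.get? tag with
    | some i => PySem.List.pySetD label i 1
    | none => label)
    (List.replicate pvClasses.length 0)

-- ===== PRECONDITION & SPEC =====
def Spec_encode_tag (error_tags : List String) (out : List Int) : Prop := out = encode_tag_alt error_tags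
instance (error_tags : List String) (out : List Int) : Decidable (Spec_encode_tag error_tags out) := by unfold Spec_encode_tag; infer_instance

-- ===== CLAIM (what is proved, stated in full; the proofs are below) =====
def Claim_equal_encode_tag : Prop := ∀ (error_tags : List String), Dom_encode_tag error_tags → Spec_encode_tag error_tags (encode_tag error_tags)

-- ===== LEMMAS AND PROOFS =====

-- the (shared) prefix-stripping step, for the proofs
def pvStrip (tag : String) : String :=
  if pvPrefixes.contains (PySem.Str.slice tag none (some 2)) then
    PySem.Str.slice tag (some 2) none else tag

-- B's index dict, named for the proofs (definitionally the one in the port)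
def pvIndexDict : PySem.Dict String Int :=
  (PySem.List.enumerate pvClasses 0).foldl (fun d p => d.insert p.2 p.1) PySem.Dict.empty

-- B's loop body, named for the proofs (definitionally the one in the port)
def pvStepB (label : List Int) (tag : String) : List Int :=
  match pvIndexDict.get? (pvStrip tag) with
  | some i => PySem.List.pySetD label i 1
  | none => label

lemma indexDict_get_self : ∀ j : Nat, j < 24 →
    pvIndexDict.get? (pvClasses[j]!) = some (j : Int) := by decide

lemma indexDict_get_none (s : String) (hs : s ∉ pvClasses) :
    pvIndexDict.get? s = none := by
  rw [PySem.Dict.get?_eq_none_iff_not_mem_keys]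
  have hk : pvIndexDict.keys = pvClasses := by decide
  rw [hk]; exact hs

lemma innerA (c : String) (tags : List String) (m : Int) :
    tags.foldl (fun m tag =>
      let tag := if pvPrefixes.contains (PySem.Str.slice tag none (some 2)) then
                   PySem.Str.slice tag (some 2) none else tag
      if tag == c then 1 else m) m
    = if tags.any (fun t => pvStrip t == c) then 1 else m := by
  induction tags generalizing m with
  | nil => simp
  | cons t ts ih =>
    rw [List.foldl_cons, ih, List.any_cons]
    show (if (ts.any fun t => pvStrip t == c) = true then (1 : Int) else
        if (pvStrip t == c) = true then 1 else m)
      = if ((pvStrip t == c) || ts.any fun t => pvStrip t == c) = true then 1 else m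
    cases h1 : (pvStrip t == c) <;>
      cases h2 : (ts.any fun t => pvStrip t == c) <;> simp_all

lemma stepB_length (label : List Int) (tag : String) :
    (pvStepB label tag).length = label.length := by
  unfold pvStepB
  cases h : pvIndexDict.get? (pvStrip tag) with
  | none => rfl
  | some i => simp [PySem.List.length_pySetD]

lemma foldB_length (tags : List String) (label : List Int) :
    (tags.foldl pvStepB label).length = label.length := by
  induction tags generalizing label with
  | nil => rfl
  | cons t ts ih => rw [List.foldl_cons, ih, stepB_length]

lemma stepB_getD (label : List Int) (hl : label.length = pvClasses.length)
    (tag : String) (k : Nat) (hk : k < pvClasses.length) :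
    (pvStepB label tag).getD k 0
      = if pvStrip tag == pvClasses[k]! then 1 else label.getD k 0 := by
  have hkc : pvClasses[k]! = pvClasses[k] := getElem!_pos pvClasses k hk
  by_cases hmem : pvStrip tag ∈ pvClasses
  · obtain ⟨j, hj, hje⟩ := List.mem_iff_getElem.mp hmem
    have hget : pvIndexDict.get? (pvStrip tag) = some (j : Int) := by
      rw [show pvStrip tag = pvClasses[j]! from by rw [getElem!_pos pvClasses j hj, hje]]
      exact indexDict_get_self j hj
    unfold pvStepB
    rw [hget]
    simp only [PySem.List.pySetD_natCast]
    rw [List.getD_eq_getElem?_getD, List.getD_eq_getElem?_getD, List.getElem?_set]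
    have hnd : pvClasses.Nodup := by decide
    by_cases hjk : j = k
    · subst hjk
      simp [hl, hj, ← hje]
    · have hne : (pvStrip tag == pvClasses[k]!) = false := by
        simp only [beq_eq_false_iff_ne, ne_eq, hkc, ← hje]
        exact fun h => hjk (hnd.getElem_inj_iff.mp h)
      rw [hne]
      simp [hjk]
  · have hne : (pvStrip tag == pvClasses[k]!) = false := by
      simp only [beq_eq_false_iff_ne, ne_eq, hkc]
      exact fun h => hmem (h ▸ List.getElem_mem hk)
    unfold pvStepB
    rw [indexDict_get_none _ hmem, hne]
    simp

lemma foldB_getD (tags : List String) (label : List Int) (hl : label.length = pvClasses.length)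
    (k : Nat) (hk : k < pvClasses.length) :
    (tags.foldl pvStepB label).getD k 0
      = if tags.any (fun t => pvStrip t == pvClasses[k]!) then 1 else label.getD k 0 := by
  induction tags generalizing label with
  | nil => simp
  | cons t ts ih =>
    rw [List.foldl_cons, ih (pvStepB label t) (by rw [stepB_length, hl]),
      stepB_getD label hl t k hk, List.any_cons]
    cases h1 : (pvStrip t == pvClasses[k]!) <;>
      cases h2 : (ts.any fun t => pvStrip t == pvClasses[k]!) <;> simp_all

-- ===== VERDICT (by name: the statement is the Claim_ definition above) =====
theorem encode_tag_spec : Claim_equal_encode_tag := by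
  intro tags _
  show encode_tag tags = encode_tag_alt tags
  have hB : encode_tag_alt tags = tags.foldl pvStepB (List.replicate pvClasses.length 0) := rfl
  unfold encode_tag
  rw [hB]
  simp only [PySem.List.foldl_append_singleton_eq_map, List.nil_append, innerA]
  refine List.ext_getElem (by simp [foldB_length]) ?_
  intro k hk1 hk2
  have hk : k < pvClasses.length := by simpa using hk1
  have := foldB_getD tags (List.replicate pvClasses.length 0) (by simp) k hk
  rw [List.getD_eq_getElem?_getD, List.getElem?_eq_getElem hk2] at this
  simp only [Option.getD_some] at this
  rw [this]
  simp [hk]
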